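-- pv_equiv track=rewrite | github.com/a2733308964-bit/translated_subtitle_generator | add_style.py | add_style
-- ===== SOURCE A (Python) =====
-- def add_style(lines, style_line1, style_line2):
--     """
--     给每个 5 行字幕块的 line1 和 line2 添加不同的字体样式信息。
--     适用于严格 5 行格式的 SRT 文件：
--     序号
--     时间
--     line1
--     line2
--     空行
--
--     参数：
--         lines (List[str]): 原始 SRT 文件的行列表
--         style_line1 (str): line1 的字体样式
--         style_line2 (str): line2 的字体样式
--
--     返回：
--         List[str]: 添加样式后的行列表
--     """
--     output_lines = []
--     total_lines = len(lines)
--     i = 0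
--
--     while i < total_lines:
--         if i + 4 < total_lines:
--             block = lines[i:i+5]
--             # 给 line1 和 line2 添加不同字体信息
--             block[2] = style_line1 + block[2]
--             block[3] = style_line2 + block[3]
--             output_lines.extend(block)
--             i += 5
--         else:
--             # 不足 5 行的直接原样加入
--             output_lines.append(lines[i])
--             i += 1
--
--     return output_lines
-- ===== SOURCE B (Python) =====
-- def add_style(lines, style_line1, style_line2):
--     # Per-line classification: an index i gets a style iff it lies before the
--     # last complete 5-line block boundary and sits at offset 2 or 3 of its block.
--     limit = (len(lines) // 5) * 5
--     return [style_line1 + line if i < limit and i % 5 == 2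
--             else style_line2 + line if i < limit and i % 5 == 3
--             else line
--             for i, line in enumerate(lines)]
-- ===== Notes on version B (the rewrite author's own statement) =====
-- stated objective: simpler
-- what changed: Replaces the sequential while-loop that slices, mutates and re-extends 5-line blocks with a single comprehension over enumerate that classifies each line by a closed-form condition (index before (len//5)*5 and index mod 5 in {2,3}).
import Mathlib
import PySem

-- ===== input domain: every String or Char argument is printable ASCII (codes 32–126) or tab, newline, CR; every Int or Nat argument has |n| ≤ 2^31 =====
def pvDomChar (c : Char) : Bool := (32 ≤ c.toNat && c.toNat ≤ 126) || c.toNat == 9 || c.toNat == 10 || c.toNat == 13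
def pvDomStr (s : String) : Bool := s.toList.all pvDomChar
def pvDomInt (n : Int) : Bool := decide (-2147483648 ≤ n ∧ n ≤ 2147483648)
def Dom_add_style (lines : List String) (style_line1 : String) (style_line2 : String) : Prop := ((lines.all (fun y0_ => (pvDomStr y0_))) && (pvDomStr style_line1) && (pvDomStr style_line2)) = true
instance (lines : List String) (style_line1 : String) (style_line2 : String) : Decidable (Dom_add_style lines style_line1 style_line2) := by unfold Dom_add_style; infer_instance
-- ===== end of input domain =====

-- B replaces A's block-slicing while-loop by a single per-line map with a closed-form index condition; objective: simpler.


-- ===== PORT A =====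
-- the while-loop, step for step; the indices 2/3 into `block` and `i` into `lines`
-- are always in range here (Python would raise IndexError otherwise), hence the `.getD ""`
def add_style_go (lines : List String) (style_line1 style_line2 : String)
    (total : Int) (i : Int) (output_lines : List String) : List String :=
  if _h : i < total then
    if i + 4 < total then
      let block := PySem.List.slice lines (some i) (some (i + 5))
      let block := PySem.List.pySetD block 2 (style_line1 ++ (PySem.List.pyGet? block 2).getD "")
      let block := PySem.List.pySetD block 3 (style_line2 ++ (PySem.List.pyGet? block 3).getD "")
      add_style_go lines style_line1 style_line2 total (i + 5) (output_lines ++ block)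
    else
      add_style_go lines style_line1 style_line2 total (i + 1)
        (output_lines ++ [(PySem.List.pyGet? lines i).getD ""])
  else output_lines
termination_by (total - i).toNat
decreasing_by all_goals omega

def add_style (lines : List String) (style_line1 : String) (style_line2 : String) : List String :=
  add_style_go lines style_line1 style_line2 (PySem.List.len lines) 0 []

-- ===== PORT B =====
def add_style_alt (lines : List String) (style_line1 : String) (style_line2 : String) : List String :=
  let limit := PySem.Int.floordiv (PySem.List.len lines) 5 * 5
  (PySem.List.enumerate lines 0).map (fun p =>
    if p.1 < limit ∧ PySem.Int.mod p.1 5 = 2 then style_line1 ++ p.2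
    else if p.1 < limit ∧ PySem.Int.mod p.1 5 = 3 then style_line2 ++ p.2
    else p.2)

-- ===== PRECONDITION & SPEC =====
def Spec_add_style (lines : List String) (style_line1 : String) (style_line2 : String) (out : List String) : Prop := out = add_style_alt lines style_line1 style_line2
instance (lines : List String) (style_line1 : String) (style_line2 : String) (out : List String) : Decidable (Spec_add_style lines style_line1 style_line2 out) := by unfold Spec_add_style; infer_instance

-- ===== CLAIM (what is proved, stated in full; the proofs are below) =====
def Claim_equal_add_style : Prop := ∀ (lines : List String) (style_line1 : String) (style_line2 : String), Dom_add_style lines style_line1 style_line2 → Spec_add_style lines style_line1 style_line2 (add_style lines style_line1 style_line2)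

-- ===== LEMMAS AND PROOFS =====

-- common reference function: style the complete 5-line blocks, leave the tail alone
def gStyle (s1 s2 : String) : List String → List String
  | a :: b :: c :: d :: e :: rest => a :: b :: (s1 ++ c) :: (s2 ++ d) :: e :: gStyle s1 s2 rest
  | xs => xs


lemma gStyle_short (s1 s2 : String) (xs : List String) (h : xs.length < 5) :
    gStyle s1 s2 xs = xs := by
  match xs with
  | [] => rfl
  | [_] => rfl
  | [_, _] => rfl
  | [_, _, _] => rfl
  | [_, _, _, _] => rfl
  | _ :: _ :: _ :: _ :: _ :: _ => simp at h; omega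

lemma exists5 {α : Type} (xs : List α) (h : 5 ≤ xs.length) :
    ∃ a b c d e t, xs = a :: b :: c :: d :: e :: t := by
  match xs with
  | a :: b :: c :: d :: e :: t => exact ⟨a, b, c, d, e, t, rfl⟩
  | [] | [_] | [_, _] | [_, _, _] | [_, _, _, _] => simp at h

lemma add_style_go_eq_aux (lines : List String) (s1 s2 : String) :
    ∀ (n : Nat) (i : Nat) (out : List String), lines.length - i ≤ n →
      add_style_go lines s1 s2 (PySem.List.len lines) (i : Int) out
        = out ++ gStyle s1 s2 (lines.drop i) := by
  intro n
  induction n with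
  | zero =>
    intro i out hn
    rw [add_style_go]
    rw [dif_neg (by simp [PySem.List.len_eq]; omega)]
    rw [List.drop_eq_nil_of_le (by omega)]
    simp [gStyle]
  | succ n ih =>
    intro i out hn
    by_cases hlt : i < lines.length
    · by_cases hfull : i + 5 ≤ lines.length
      · -- full block
        obtain ⟨a, b, c, d, e, t, hdrop⟩ := exists5 (lines.drop i) (by simp; omega)
        rw [add_style_go]
        rw [dif_pos (by simp [PySem.List.len_eq]; omega)]
        rw [if_pos (by simp [PySem.List.len_eq]; omega)]
        have hsl : PySem.List.slice lines (some (i : Int)) (some ((i : Int) + 5))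
            = [a, b, c, d, e] := by
          rw [show ((i : Int) + 5) = ((i : Int) + ((5 : Nat) : Int)) by norm_num,
              PySem.List.slice_natCast_add, hdrop]
          rfl
        rw [hsl]
        have hstep : ((i : Int) + 5) = (((i + 5 : Nat)) : Int) := by push_cast; ring
        rw [hstep, ih (i + 5) _ (by omega)]
        have hdrop5 : lines.drop (i + 5) = t := by
          have h2 := congrArg (List.drop 5) hdrop
          rw [List.drop_drop] at h2
          simpa [Nat.add_comm] using h2
        rw [hdrop5, hdrop]
        simp [gStyle, PySem.List.pySetD, PySem.List.pySet?, PySem.List.pyGet?,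
              PySem.List.pyIdx?]
      · -- leftover tail: copy one line
        rw [add_style_go]
        rw [dif_pos (by simp [PySem.List.len_eq]; omega)]
        rw [if_neg (by simp [PySem.List.len_eq]; omega)]
        have hget : (PySem.List.pyGet? lines (i : Int)).getD "" = lines[i]'hlt := by
          rw [PySem.List.pyGet?_natCast]
          simp [List.getElem?_eq_getElem hlt]
        have hstep : ((i : Int) + 1) = (((i + 1 : Nat)) : Int) := by push_cast; ring
        rw [hget, hstep, ih (i + 1) _ (by omega)]
        have hd : lines.drop i = lines[i]'hlt :: lines.drop (i + 1) :=
          List.drop_eq_getElem_cons hlt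
        rw [hd, gStyle_short s1 s2 _ (by simp; omega),
            gStyle_short s1 s2 _ (by simp; omega)]
        simp
    · rw [add_style_go]
      rw [dif_neg (by simp [PySem.List.len_eq]; omega)]
      rw [List.drop_eq_nil_of_le (by omega)]
      simp [gStyle]

lemma add_style_go_eq (lines : List String) (s1 s2 : String) (i : Nat) (out : List String) :
    add_style_go lines s1 s2 (PySem.List.len lines) (i : Int) out
      = out ++ gStyle s1 s2 (lines.drop i) :=
  add_style_go_eq_aux lines s1 s2 (lines.length - i) i out le_rfl

lemma map_enum_of_le (s1 s2 : String) (L : Int) :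
    ∀ (xs : List String) (s : Int), L ≤ s →
      (PySem.List.enumerate xs s).map (fun p =>
          if p.1 < L ∧ PySem.Int.mod p.1 5 = 2 then s1 ++ p.2
          else if p.1 < L ∧ PySem.Int.mod p.1 5 = 3 then s2 ++ p.2
          else p.2) = xs := by
  intro xs
  induction xs with
  | nil => intro s _; simp [PySem.List.enumerate_nil]
  | cons x xs ih =>
    intro s hs
    rw [PySem.List.enumerate_cons]
    simp only [List.map_cons]
    rw [if_neg (by rintro ⟨h, _⟩; omega), if_neg (by rintro ⟨h, _⟩; omega)]
    rw [ih (s + 1) (by omega)]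

lemma map_enum_eq_gStyle (s1 s2 : String) :
    ∀ (n : Nat) (xs : List String) (s L : Int), xs.length ≤ n →
      0 ≤ s → PySem.Int.mod s 5 = 0 → L = s + ((xs.length / 5 : Nat) : Int) * 5 →
      (PySem.List.enumerate xs s).map (fun p =>
          if p.1 < L ∧ PySem.Int.mod p.1 5 = 2 then s1 ++ p.2
          else if p.1 < L ∧ PySem.Int.mod p.1 5 = 3 then s2 ++ p.2
          else p.2) = gStyle s1 s2 xs := by
  intro n
  induction n with
  | zero =>
    intro xs s L hn _ _ _
    have : xs = [] := List.eq_nil_of_length_eq_zero (by omega)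
    subst this
    simp [PySem.List.enumerate_nil, gStyle]
  | succ n ih =>
    intro xs s L hn hs hmod hL
    rw [PySem.Int.mod_eq_emod_of_pos (by norm_num)] at hmod
    by_cases h5 : 5 ≤ xs.length
    · obtain ⟨a, b, c, d, e, t, rfl⟩ := exists5 xs h5
      have hlen : (a :: b :: c :: d :: e :: t).length = t.length + 5 := by simp
      have hLv : L = s + 5 + ((t.length / 5 : Nat) : Int) * 5 := by
        rw [hL, hlen]
        have : (t.length + 5) / 5 = t.length / 5 + 1 := by omega
        rw [this]; push_cast; ring
      have hge : (0 : Int) ≤ ((t.length / 5 : Nat) : Int) * 5 := by positivity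
      simp only [PySem.List.enumerate_cons, List.map_cons]
      rw [if_neg (by
            rintro ⟨_, h2⟩
            rw [PySem.Int.mod_eq_emod_of_pos (by norm_num)] at h2; omega),
          if_neg (by
            rintro ⟨_, h2⟩
            rw [PySem.Int.mod_eq_emod_of_pos (by norm_num)] at h2; omega),
          if_neg (by
            rintro ⟨_, h2⟩
            rw [PySem.Int.mod_eq_emod_of_pos (by norm_num)] at h2; omega),
          if_neg (by
            rintro ⟨_, h2⟩
            rw [PySem.Int.mod_eq_emod_of_pos (by norm_num)] at h2; omega),
          if_pos (⟨by omega, by rw [PySem.Int.mod_eq_emod_of_pos (by norm_num)]; omega⟩ :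
            (s + 1 + 1 < L ∧ PySem.Int.mod (s + 1 + 1) 5 = 2)),
          if_neg (by
            rintro ⟨_, h2⟩
            rw [PySem.Int.mod_eq_emod_of_pos (by norm_num)] at h2; omega),
          if_pos (⟨by omega, by rw [PySem.Int.mod_eq_emod_of_pos (by norm_num)]; omega⟩ :
            (s + 1 + 1 + 1 < L ∧ PySem.Int.mod (s + 1 + 1 + 1) 5 = 3)),
          if_neg (by
            rintro ⟨_, h2⟩
            rw [PySem.Int.mod_eq_emod_of_pos (by norm_num)] at h2; omega),
          if_neg (by
            rintro ⟨_, h2⟩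
            rw [PySem.Int.mod_eq_emod_of_pos (by norm_num)] at h2; omega)]
      rw [ih t (s + 1 + 1 + 1 + 1 + 1) L (by simp at hn; omega) (by omega)
            (by rw [PySem.Int.mod_eq_emod_of_pos (by norm_num)]; omega)
            (by rw [hLv]; ring)]
      rfl
    · have h0 : xs.length / 5 = 0 := by omega
      rw [map_enum_of_le s1 s2 L xs s (by rw [hL, h0]; simp),
          gStyle_short s1 s2 xs (by omega)]

lemma alt_eq (lines : List String) (s1 s2 : String) :
    add_style_alt lines s1 s2 = gStyle s1 s2 lines := by
  unfold add_style_alt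
  have hfd : PySem.Int.floordiv (PySem.List.len lines) 5 * 5
      = 0 + ((lines.length / 5 : Nat) : Int) * 5 := by
    rw [PySem.List.len_eq]
    rw [show ((5 : Int)) = ((5 : Nat) : Int) by norm_num,
        PySem.Int.floordiv_natCast]
    push_cast; ring
  rw [map_enum_eq_gStyle s1 s2 lines.length lines 0
        (PySem.Int.floordiv (PySem.List.len lines) 5 * 5) le_rfl le_rfl (by decide) hfd]

-- ===== VERDICT (by name: the statement is the Claim_ definition above) =====
theorem add_style_spec : Claim_equal_add_style := by
  intro lines s1 s2 _
  unfold Spec_add_style add_style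
  rw [alt_eq]
  have := add_style_go_eq lines s1 s2 0 []
  simpa using this
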